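-- pv_equiv track=rewrite | github.com/ErickStudios/e4sim | e4lib/e4asm/module.py | ParseMacros
-- ===== SOURCE A (Python) =====
-- def ParseMacros(code: str) -> dict[str, str]:
--     macros = {}
--     lines = code.splitlines()
--     i = 0
--     while i < len(lines):
--         line = lines[i].strip()
--
--         if line.startswith("@RegexDef"):
--             regex = line.replace("@RegexDef", "").strip()
--             i += 1
--             if i < len(lines) and lines[i].strip() == "@impl_begins":
--                 i += 1
--                 expansion_lines = []
--                 while i < len(lines) and lines[i].strip() != "@impl_ends":
--                     expansion_lines.append(lines[i])
--                     i += 1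
--                 macros[regex] = "\n".join(expansion_lines)
--         i += 1
--     return macros
-- ===== SOURCE B (Python) =====
-- def ParseMacros(code: str) -> dict[str, str]:
--     NORMAL, EXPECT_BEGIN, COLLECTING = 0, 1, 2
--     macros = {}
--     state = NORMAL
--     regex = ""
--     buffer = []
--     for line in code.splitlines():
--         if state == NORMAL:
--             stripped = line.strip()
--             if stripped.startswith("@RegexDef"):
--                 regex = stripped.replace("@RegexDef", "").strip()
--                 state = EXPECT_BEGIN
--         elif state == EXPECT_BEGIN:
--             if line.strip() == "@impl_begins":
--                 state = COLLECTING
--                 buffer = []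
--             else:
--                 state = NORMAL
--         else:  # COLLECTING
--             if line.strip() == "@impl_ends":
--                 macros[regex] = "\n".join(buffer)
--                 state = NORMAL
--             else:
--                 buffer.append(line)
--     if state == COLLECTING:
--         macros[regex] = "\n".join(buffer)
--     return macros
-- ===== Notes on version B (the rewrite author's own statement) =====
-- stated objective: simpler
-- what changed: Replaces A's index-based outer while loop with nested inner scans (manual i bookkeeping, double increments) by a single flat for-loop over the lines driven by a three-state machine (NORMAL/EXPECT_BEGIN/COLLECTING) with a buffer, flushing at EOF.
import Mathlib
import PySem

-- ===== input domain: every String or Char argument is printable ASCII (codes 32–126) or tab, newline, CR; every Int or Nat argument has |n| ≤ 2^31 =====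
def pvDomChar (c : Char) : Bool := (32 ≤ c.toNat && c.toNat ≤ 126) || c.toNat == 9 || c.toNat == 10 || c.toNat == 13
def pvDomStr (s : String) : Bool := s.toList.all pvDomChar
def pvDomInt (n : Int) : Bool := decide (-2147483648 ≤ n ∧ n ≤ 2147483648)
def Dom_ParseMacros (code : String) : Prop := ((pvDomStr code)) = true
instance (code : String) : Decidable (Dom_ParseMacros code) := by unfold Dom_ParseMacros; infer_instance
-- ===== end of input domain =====

-- B replaces A's index-juggling nested while-loops by a single flat pass with an explicit
-- three-state machine (simpler decomposition; same asymptotic cost).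

-- ===== PORT A =====
-- inner while: collect lines until one strips to "@impl_ends"; return (collected, lines after the terminator)
def pvCollectA : List String → List String × List String
  | [] => ([], [])
  | l :: rest =>
    if PySem.Str.strip l == "@impl_ends" then ([], rest)
    else
      let p := pvCollectA rest
      (l :: p.1, p.2)

-- used by pvGoA's termination proof
theorem pvCollectA_len (xs : List String) : (pvCollectA xs).2.length ≤ xs.length := by
  induction xs with
  | nil => simp [pvCollectA]
  | cons l rest ih =>
    simp only [pvCollectA]
    split
    · simp
    · simpa using Nat.le_succ_of_le ih

-- outer while over the line list (position i ↦ remaining suffix)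
def pvGoA : List String → PySem.Dict String String → PySem.Dict String String
  | [], macros => macros
  | l :: rest, macros =>
    let line := PySem.Str.strip l
    if PySem.Str.startswith line "@RegexDef" then
      let regex := PySem.Str.strip (PySem.Str.replace line "@RegexDef" "")
      match rest with
      | [] => macros
      | l2 :: rest2 =>
        if PySem.Str.strip l2 == "@impl_begins" then
          let p := pvCollectA rest2
          pvGoA p.2 (macros.insert regex (PySem.Str.join "\n" p.1))
        else pvGoA rest2 macros
    else pvGoA rest macros
termination_by ls _ => ls.length
decreasing_by
  · exact Nat.lt_succ_of_lt (Nat.lt_succ_of_le (pvCollectA_len _))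
  · exact Nat.lt_succ_of_lt (Nat.lt_succ_self _)
  · exact Nat.lt_succ_self _

def ParseMacros (code : String) : List (String × String) :=
  (pvGoA (PySem.Str.splitlines code) PySem.Dict.empty).items

-- ===== PORT B =====
inductive PvStateB
  | normal
  | expect (regex : String)
  | collecting (regex : String) (buffer : List String)
deriving DecidableEq, Repr

def pvStepB (st : PvStateB × PySem.Dict String String) (line : String) :
    PvStateB × PySem.Dict String String :=
  match st.1 with
  | .normal =>
    let stripped := PySem.Str.strip line
    if PySem.Str.startswith stripped "@RegexDef" then
      (.expect (PySem.Str.strip (PySem.Str.replace stripped "@RegexDef" "")), st.2)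
    else (.normal, st.2)
  | .expect regex =>
    if PySem.Str.strip line == "@impl_begins" then (.collecting regex [], st.2)
    else (.normal, st.2)
  | .collecting regex buffer =>
    if PySem.Str.strip line == "@impl_ends" then
      (.normal, st.2.insert regex (PySem.Str.join "\n" buffer))
    else (.collecting regex (buffer ++ [line]), st.2)

-- post-loop flush: if still collecting at EOF, write the buffer
def pvFlushB (st : PvStateB × PySem.Dict String String) : PySem.Dict String String :=
  match st.1 with
  | .collecting regex buffer => st.2.insert regex (PySem.Str.join "\n" buffer)
  | _ => st.2

def ParseMacros_alt (code : String) : List (String × String) :=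
  (pvFlushB ((PySem.Str.splitlines code).foldl pvStepB (.normal, PySem.Dict.empty))).items

-- ===== PRECONDITION & SPEC =====
def Spec_ParseMacros (code : String) (out : List (String × String)) : Prop := out = ParseMacros_alt code
instance (code : String) (out : List (String × String)) : Decidable (Spec_ParseMacros code out) := by unfold Spec_ParseMacros; infer_instance

-- ===== CLAIM (what is proved, stated in full; the proofs are below) =====
def Claim_equal_ParseMacros : Prop := ∀ (code : String), Dom_ParseMacros code → Spec_ParseMacros code (ParseMacros code)

-- ===== LEMMAS AND PROOFS =====

-- a collecting run equals the collected-then-normal run over the remainder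
theorem pvCollect_run (xs : List String) : ∀ (r : String) (buf : List String)
    (m : PySem.Dict String String),
    pvFlushB (xs.foldl pvStepB (.collecting r buf, m)) =
      pvFlushB ((pvCollectA xs).2.foldl pvStepB
        (.normal, m.insert r (PySem.Str.join "\n" (buf ++ (pvCollectA xs).1)))) := by
  induction xs with
  | nil => intro r buf m; simp [pvCollectA, pvFlushB]
  | cons l rest ih =>
    intro r buf m
    by_cases h : PySem.Str.strip l == "@impl_ends"
    · simp only [pvCollectA, List.foldl_cons, pvStepB, if_pos h, List.append_nil]
    · simp only [pvCollectA, List.foldl_cons, pvStepB, if_neg h]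
      rw [ih]
      simp [List.append_assoc]

theorem pvMain (n : Nat) : ∀ (ls : List String) (m : PySem.Dict String String),
    ls.length ≤ n → pvFlushB (ls.foldl pvStepB (.normal, m)) = pvGoA ls m := by
  induction n with
  | zero =>
    intro ls m h
    have : ls = [] := List.eq_nil_of_length_eq_zero (Nat.le_zero.mp h)
    subst this; simp [pvFlushB, pvGoA]
  | succ n ih =>
    intro ls m h
    match ls with
    | [] => simp [pvFlushB, pvGoA]
    | l :: rest =>
      simp only [List.length_cons, Nat.succ_le_succ_iff] at h
      by_cases h1 : PySem.Str.startswith (PySem.Str.strip l) "@RegexDef"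
      · have e1 : pvStepB (PvStateB.normal, m) l
            = (PvStateB.expect (PySem.Str.strip (PySem.Str.replace (PySem.Str.strip l) "@RegexDef" "")), m) := by
          simp only [pvStepB, if_pos h1]
        match rest with
        | [] =>
          rw [List.foldl_cons, e1, List.foldl_nil, pvGoA]
          simp only [if_pos h1, pvFlushB]
        | l2 :: rest2 =>
          simp only [List.length_cons] at h
          conv_rhs => rw [pvGoA]
          by_cases h2 : PySem.Str.strip l2 == "@impl_begins"
          · have e2 : ∀ r, pvStepB (PvStateB.expect r, m) l2 = (PvStateB.collecting r [], m) := by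
              intro r; simp only [pvStepB, if_pos h2]
            rw [List.foldl_cons, List.foldl_cons, e1, e2, pvCollect_run]
            simp only [List.nil_append, if_pos h1, if_pos h2]
            exact ih _ _ (le_trans (pvCollectA_len rest2) (by omega))
          · have e2 : ∀ r, pvStepB (PvStateB.expect r, m) l2 = (PvStateB.normal, m) := by
              intro r; simp only [pvStepB, if_neg h2]
            rw [List.foldl_cons, List.foldl_cons, e1, e2]
            simp only [if_pos h1, if_neg h2]
            exact ih _ _ (by omega)
      · have e1 : pvStepB (PvStateB.normal, m) l = (PvStateB.normal, m) := by
          simp only [pvStepB, if_neg h1]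
        rw [List.foldl_cons, e1]
        conv_rhs => rw [pvGoA]
        simp only [if_neg h1]
        exact ih _ _ h

-- ===== VERDICT (by name: the statement is the Claim_ definition above) =====
theorem ParseMacros_spec : Claim_equal_ParseMacros := by
  intro code _
  unfold Spec_ParseMacros ParseMacros ParseMacros_alt
  rw [pvMain (PySem.Str.splitlines code).length _ _ (le_refl _)]
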